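-- pv_equiv track=rewrite | github.com/elanorstarksby/aoc2024 | day14/day14.py | search_n
-- ===== SOURCE A (Python) =====
-- def search_n(grid, n):
--     for r in grid:
--         count = 0
--         for c in r:
--             if c != 0:
--                 count += 1
--             else:
--                 count = 0
--             if count >= n:
--                 return True
--     return False
-- ===== SOURCE B (Python) =====
-- def search_n(grid, n):
--     # zero-position decomposition: a row contains n consecutive nonzero cells
--     # iff some gap between consecutive zero positions (with sentinels) is >= n
--     for r in grid:
--         if not r:
--             continue
--         zeros = [-1] + [i for i, c in enumerate(r) if c == 0] + [len(r)]
--         if max(zeros[j + 1] - zeros[j] - 1 for j in range(len(zeros) - 1)) >= n: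
--             return True
--     return False
-- ===== Notes on version B (the rewrite author's own statement) =====
-- stated objective: alternative
-- what changed: Replaces A's incremental reset-counter scan with early exit by a decomposition that builds the list of zero positions (with -1/len sentinels) per row and compares the maximum gap between consecutive zero positions against n.
import Mathlib
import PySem

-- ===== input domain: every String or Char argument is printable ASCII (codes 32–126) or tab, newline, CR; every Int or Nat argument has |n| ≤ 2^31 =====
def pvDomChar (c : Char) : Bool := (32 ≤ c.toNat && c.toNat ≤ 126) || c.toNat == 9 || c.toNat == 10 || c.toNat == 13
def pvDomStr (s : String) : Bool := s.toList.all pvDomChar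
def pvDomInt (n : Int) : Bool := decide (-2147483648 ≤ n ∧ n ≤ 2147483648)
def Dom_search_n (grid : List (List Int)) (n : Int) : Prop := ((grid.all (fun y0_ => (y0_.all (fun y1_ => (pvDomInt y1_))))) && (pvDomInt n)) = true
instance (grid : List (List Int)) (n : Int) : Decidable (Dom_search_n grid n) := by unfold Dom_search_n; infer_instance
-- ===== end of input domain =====

-- B replaces A's incremental reset-counter scan by a build-the-zero-positions-then-max-gap
-- decomposition (objective: alternative, same cost).

-- ===== PORT A =====
-- inner 'for c in r' loop with the running count and the early return
def searchRowA (n cur : Int) : List Int → Bool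
  | [] => false
  | c :: rest =>
    let cur' := if c ≠ 0 then cur + 1 else 0
    if n ≤ cur' then true else searchRowA n cur' rest

def search_n (grid : List (List Int)) (n : Int) : Bool :=
  match grid with
  | [] => false
  | r :: rest => if searchRowA n 0 r then true else search_n rest n

-- ===== PORT B =====
-- [-1] + [i for i, c in enumerate(r) if c == 0] + [len(r)]
def zerosB (r : List Int) : List Int :=
  [-1] ++ ((PySem.List.enumerate r).filter (fun p => p.2 == 0)).map (fun p => p.1) ++ [(r.length : Int)]

-- max(zeros[j+1] - zeros[j] - 1 for j in range(len(zeros)-1)); always called with ≥ 2 elements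
def maxGapB : List Int → Int
  | [a, b] => b - a - 1
  | a :: b :: rest => max (b - a - 1) (maxGapB (b :: rest))
  | _ => 0

def search_n_alt (grid : List (List Int)) (n : Int) : Bool :=
  match grid with
  | [] => false
  | r :: rest =>
    if r.isEmpty then search_n_alt rest n
    else if n ≤ maxGapB (zerosB r) then true else search_n_alt rest n

-- ===== PRECONDITION & SPEC =====
def Spec_search_n (grid : List (List Int)) (n : Int) (out : Bool) : Prop := out = search_n_alt grid n
instance (grid : List (List Int)) (n : Int) (out : Bool) : Decidable (Spec_search_n grid n out) := by unfold Spec_search_n; infer_instance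

-- ===== CLAIM (what is proved, stated in full; the proofs are below) =====
def Claim_equal_search_n : Prop := ∀ (grid : List (List Int)) (n : Int), Dom_search_n grid n → Spec_search_n grid n (search_n grid n)

-- ===== LEMMAS AND PROOFS =====

-- (leading nonzero-run length, best nonzero-run length) of a row
def pLG : List Int → Int × Int
  | [] => (0, 0)
  | c :: rest =>
    let p := pLG rest
    if c ≠ 0 then (p.1 + 1, max (p.1 + 1) p.2) else (0, max 0 p.2)

theorem pLG_bounds (r : List Int) : 0 ≤ (pLG r).1 ∧ (pLG r).1 ≤ (pLG r).2 := by
  induction r with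
  | nil => simp [pLG]
  | cons c rest ih =>
    simp only [pLG]
    split <;> simp <;> omega

-- max of A's running counter over the nonempty row c :: rest, starting from carry cur
def MxA (cur c : Int) : List Int → Int
  | [] => if c ≠ 0 then cur + 1 else 0
  | d :: rest =>
    let cur' := if c ≠ 0 then cur + 1 else 0
    max cur' (MxA cur' d rest)

theorem searchRowA_eq_MxA (rest : List Int) (c cur n : Int) :
    searchRowA n cur (c :: rest) = decide (n ≤ MxA cur c rest) := by
  induction rest generalizing c cur with
  | nil =>
    simp only [searchRowA, MxA]
    split <;> simp_all
  | cons d rest ih =>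
    have hunf : searchRowA n cur (c :: d :: rest) =
        (if n ≤ (if c ≠ 0 then cur + 1 else 0) then true
         else searchRowA n (if c ≠ 0 then cur + 1 else 0) (d :: rest)) := rfl
    have hm : MxA cur c (d :: rest) =
        max (if c ≠ 0 then cur + 1 else 0) (MxA (if c ≠ 0 then cur + 1 else 0) d rest) := rfl
    rw [hunf, hm, ih]
    generalize (if c ≠ 0 then cur + 1 else 0) = u
    by_cases h : n ≤ u
    · rw [if_pos h]
      exact (decide_eq_true (le_trans h (le_max_left _ _))).symm
    · rw [if_neg h, decide_eq_decide]
      omega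

theorem MxA_eq_pLG (rest : List Int) (c cur : Int) (hcur : 0 ≤ cur) :
    MxA cur c rest =
      if c = 0 then (pLG (c :: rest)).2
      else max (cur + (pLG (c :: rest)).1) (pLG (c :: rest)).2 := by
  induction rest generalizing c cur with
  | nil =>
    by_cases hc : c = 0 <;> simp [MxA, pLG, hc] <;> omega
  | cons d rest ih =>
    have hb := pLG_bounds rest
    by_cases hc : c = 0
    · by_cases hd : d = 0
      · simp only [MxA, hc, ne_eq, not_true_eq_false, ite_false]
        rw [ih d 0 le_rfl]
        simp only [pLG, hd, ne_eq, not_true_eq_false, ite_false]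
        simp only [max_def]
        split_ifs <;> first | contradiction | omega | (simp only [Prod.snd_mk, Prod.fst_mk]; omega)
      · simp only [MxA, hc, ne_eq, not_true_eq_false, ite_false]
        rw [ih d 0 le_rfl]
        simp only [pLG, hd, ne_eq, not_false_eq_true, ite_true]
        simp only [max_def]
        split_ifs <;> first | contradiction | omega | (simp only [Prod.snd_mk, Prod.fst_mk]; omega)
    · by_cases hd : d = 0
      · simp only [MxA, hc, ne_eq, not_false_eq_true, ite_true]
        rw [ih d (cur + 1) (by omega)]
        simp only [pLG, hd, hc, ne_eq, not_true_eq_false, not_false_eq_true, ite_false, ite_true]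
        simp only [max_def]
        split_ifs <;> first | contradiction | omega | (simp only [Prod.snd_mk, Prod.fst_mk]; omega)
      · simp only [MxA, hc, ne_eq, not_false_eq_true, ite_true]
        rw [ih d (cur + 1) (by omega)]
        simp only [pLG, hd, hc, ne_eq, not_false_eq_true, ite_true]
        simp only [max_def]
        split_ifs <;> first | contradiction | omega | (simp only [Prod.snd_mk, Prod.fst_mk]; omega)

theorem searchRowA_eq (c : Int) (rest : List Int) (n : Int) :
    searchRowA n 0 (c :: rest) = decide (n ≤ (pLG (c :: rest)).2) := by
  rw [searchRowA_eq_MxA, MxA_eq_pLG rest c 0 le_rfl]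
  by_cases hc : c = 0
  · simp [hc]
  · have hb := pLG_bounds (c :: rest)
    simp only [hc, ite_false]
    rw [decide_eq_decide]
    omega

-- ---- B side ----

-- zero indices of r when enumeration starts at s
def ziS (s : Int) (r : List Int) : List Int :=
  ((PySem.List.enumerate r s).filter (fun p => p.2 == 0)).map (fun p => p.1)

theorem ziS_nil (s : Int) : ziS s [] = [] := by
  simp [ziS, PySem.List.enumerate_nil]

theorem ziS_cons (s c : Int) (rest : List Int) :
    ziS s (c :: rest) = (if c = 0 then [s] else []) ++ ziS (s + 1) rest := by
  by_cases hc : c = 0 <;> simp [ziS, PySem.List.enumerate_cons, hc]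

-- maxGapB of (a :: zero indices from s :: sentinel s + len)
def MG (a s : Int) (r : List Int) : Int := maxGapB (a :: ziS s r ++ [s + r.length])

theorem maxGapB_cons_cons (a s x : Int) (t : List Int) :
    maxGapB (a :: s :: (t ++ [x])) = max (s - a - 1) (maxGapB (s :: (t ++ [x]))) := by
  cases t <;> simp [maxGapB]

theorem MG_nil (a s : Int) : MG a s [] = s - a - 1 := by
  simp [MG, ziS_nil, maxGapB]

theorem MG_cons_zero (a s : Int) (rest : List Int) :
    MG a s (0 :: rest) = max (s - a - 1) (MG s (s + 1) rest) := by
  simp only [MG, ziS_cons]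
  norm_num
  rw [maxGapB_cons_cons]
  have h2 : (s : Int) + ((rest.length : Int) + 1) = (s + 1) + (rest.length : Int) := by ring
  rw [h2]

theorem MG_cons_nonzero (a s c : Int) (rest : List Int) (hc : c ≠ 0) :
    MG a s (c :: rest) = MG a (s + 1) rest := by
  simp only [MG, ziS_cons, if_neg hc, List.nil_append, List.length_cons]
  push_cast
  have h2 : (s : Int) + ((rest.length : Int) + 1) = (s + 1) + (rest.length : Int) := by ring
  rw [h2]

theorem MG_eq_pLG (r : List Int) (a s : Int) (h : a ≤ s - 1) :
    MG a s r = max (s - 1 - a + (pLG r).1) (pLG r).2 := by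
  induction r generalizing a s with
  | nil => rw [MG_nil]; simp [pLG]; omega
  | cons c rest ih =>
    have hb := pLG_bounds rest
    by_cases hc : c = 0
    · subst hc
      rw [MG_cons_zero, ih s (s + 1) (by omega)]
      simp only [pLG, ne_eq, not_true_eq_false, ite_false]
      simp only [max_def]
      split_ifs <;> first | contradiction | omega | (simp only [Prod.snd_mk, Prod.fst_mk]; omega)
    · rw [MG_cons_nonzero a s c rest hc, ih a (s + 1) (by omega)]
      simp only [pLG, ne_eq, hc, not_false_eq_true, ite_true]
      simp only [max_def]
      split_ifs <;> first | contradiction | omega | (simp only [Prod.snd_mk, Prod.fst_mk]; omega)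

theorem zerosB_eq_pLG (r : List Int) : maxGapB (zerosB r) = (pLG r).2 := by
  have h : maxGapB (zerosB r) = MG (-1) 0 r := by
    simp [MG, zerosB, ziS]
  rw [h, MG_eq_pLG r (-1) 0 (by omega)]
  have hb := pLG_bounds r
  omega

theorem search_n_eq (grid : List (List Int)) (n : Int) :
    search_n grid n = search_n_alt grid n := by
  induction grid with
  | nil => rfl
  | cons r rest ih =>
    cases r with
    | nil =>
      simp only [search_n, search_n_alt, searchRowA, List.isEmpty_nil, if_true,
        Bool.false_eq_true, if_false]
      exact ih
    | cons c rr =>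
      simp only [search_n, search_n_alt, List.isEmpty_cons, Bool.false_eq_true, if_false,
        searchRowA_eq, zerosB_eq_pLG]
      by_cases h : n ≤ (pLG (c :: rr)).2 <;> simp [h, ih]

-- ===== VERDICT (by name: the statement is the Claim_ definition above) =====
theorem search_n_spec : Claim_equal_search_n :=
  fun grid n _ => search_n_eq grid n
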